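-- pv_equiv track=rewrite | github.com/kedarjk44/basic_python | SampleCodes/str_game.py | string_splitter
-- ===== SOURCE A (Python) =====
-- def string_splitter(inp_str):
--     string_list = list(inp_str)
--     word_list = []
--     for i in range(len(inp_str)):
--         new_str = ""
--         for j in range(i,len(inp_str)):
--             new_str = new_str + inp_str[j]
--         if (new_str != "" and (len(new_str) > 1)):
--             word_list.append(new_str)
--     return word_list
-- ===== SOURCE B (Python) =====
-- def string_splitter(inp_str):
--     # Build each suffix from the previous one (one char prepended) instead of
--     # reconstructing every suffix with a nested loop.
--     acc = ""
--     out = []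
--     for ch in reversed(inp_str):
--         acc = ch + acc
--         if len(acc) > 1:
--             out.append(acc)
--     out.reverse()
--     return out
-- ===== Notes on version B (the rewrite author's own statement) =====
-- stated objective: faster
-- what changed: Replaces the nested loop that rebuilds each suffix character by character with a single reverse pass that extends an accumulator by one character per step and reverses the collected list at the end.
import Mathlib
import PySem

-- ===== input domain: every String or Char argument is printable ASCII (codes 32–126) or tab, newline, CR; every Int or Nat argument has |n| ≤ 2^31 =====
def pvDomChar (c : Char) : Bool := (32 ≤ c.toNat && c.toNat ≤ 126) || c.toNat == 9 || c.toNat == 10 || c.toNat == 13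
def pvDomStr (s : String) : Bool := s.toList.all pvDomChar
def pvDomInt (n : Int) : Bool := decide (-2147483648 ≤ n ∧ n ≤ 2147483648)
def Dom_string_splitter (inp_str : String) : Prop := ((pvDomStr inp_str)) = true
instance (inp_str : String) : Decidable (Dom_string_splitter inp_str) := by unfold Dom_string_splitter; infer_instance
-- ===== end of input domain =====

-- B builds every suffix by prepending one character to the previous suffix in a single
-- reverse pass, instead of A's nested loop that rebuilds each suffix from scratch.

-- ===== PORT A =====
-- Strings are carried as List Char (PySem.Chars level); the index j is always in range,
-- so `(… .pyGet? …).getD []` is exact (the `none` branch is unreachable).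
def string_splitter (inp_str : String) : List String :=
  let _string_list := inp_str.toList
  (PySem.List.pyRange 0 (PySem.Str.len inp_str)).foldl
    (fun word_list i =>
      let new_str : List Char :=
        (PySem.List.pyRange i (PySem.Str.len inp_str)).foldl
          (fun s j => s ++ (((PySem.Str.pyGet? inp_str j).map (fun c => [c])).getD [])) []
      if new_str ≠ [] ∧ new_str.length > 1 then word_list ++ [String.mk new_str]
      else word_list)
    []

-- ===== PORT B =====
def string_splitter_alt (inp_str : String) : List String :=
  let r := inp_str.toList.reverse.foldl
    (fun (p : List Char × List String) ch =>
      let acc := ch :: p.1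
      (acc, if acc.length > 1 then p.2 ++ [String.mk acc] else p.2))
    ([], [])
  r.2.reverse

-- ===== PRECONDITION & SPEC =====
def Spec_string_splitter (inp_str : String) (out : List String) : Prop := out = string_splitter_alt inp_str
instance (inp_str : String) (out : List String) : Decidable (Spec_string_splitter inp_str out) := by unfold Spec_string_splitter; infer_instance

-- ===== CLAIM (what is proved, stated in full; the proofs are below) =====
def Claim_equal_string_splitter : Prop := ∀ (inp_str : String), Dom_string_splitter inp_str → Spec_string_splitter inp_str (string_splitter inp_str)

-- ===== LEMMAS AND PROOFS =====

-- The suffixes of cs of length > 1, longest first (the common value of both programs).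
def pvSuffs : List Char → List (List Char)
  | a :: b :: t => (a :: b :: t) :: pvSuffs (b :: t)
  | _ => []

@[simp] theorem pvSuffs_nil : pvSuffs [] = [] := rfl
@[simp] theorem pvSuffs_single (a : Char) : pvSuffs [a] = [] := rfl

-- A's inner loop starting at index i rebuilds cs.drop i.
theorem pv_inner (cs : List Char) (i : Nat) (h : i ≤ cs.length) (s0 : List Char) :
    (PySem.List.pyRange (i : Int) (cs.length : Int)).foldl
      (fun s j => s ++ (((PySem.Chars.pyGet? cs j).map (fun c => [c])).getD [])) s0
      = s0 ++ cs.drop i := by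
  induction hn : cs.length - i generalizing i s0 with
  | zero =>
      have hi : i = cs.length := by omega
      subst hi
      rw [PySem.List.pyRange_one_eq_nil (by exact_mod_cast le_refl _)]
      rw [List.foldl_nil, List.drop_length, List.append_nil]
  | succ k ih =>
      have hlt : i < cs.length := by omega
      rw [PySem.List.pyRange_one_cons (by exact_mod_cast hlt)]
      simp only [List.foldl_cons]
      have hget : PySem.Chars.pyGet? cs (i : Int) = some cs[i] := by
        simp [PySem.Chars.pyGet?, PySem.List.pyGet?, PySem.List.pyIdx?, hlt]
      rw [hget]
      have : ((i : Int) + 1) = ((i + 1 : Nat) : Int) := by push_cast; ring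
      rw [this, ih (i + 1) (by omega) _ (by omega)]
      rw [Option.map_some, Option.getD_some, List.append_assoc, List.singleton_append,
        ← List.drop_eq_getElem_cons hlt]

-- A's outer loop collects exactly pvSuffs, longest first.
theorem pv_outer (cs : List Char) (w0 : List String) :
    (List.range cs.length).foldl
      (fun w i => if cs.drop i ≠ [] ∧ (cs.drop i).length > 1 then w ++ [String.mk (cs.drop i)] else w) w0
      = w0 ++ (pvSuffs cs).map String.mk := by
  induction cs generalizing w0 with
  | nil => simp
  | cons c t ih =>
      simp only [List.length_cons]
      rw [List.range_succ_eq_map]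
      simp only [List.foldl_cons, List.foldl_map, Nat.succ_eq_add_one, List.drop_succ_cons,
        List.drop_zero]
      cases t with
      | nil => simp
      | cons b u =>
          rw [if_pos (by simp)]
          rw [ih]
          simp [pvSuffs]

-- B's reverse pass: after consuming l.reverse the state is (l, collected suffixes, shortest last).
theorem pv_alt_core (l : List Char) :
    l.reverse.foldl
      (fun (p : List Char × List String) ch =>
        let acc := ch :: p.1
        (acc, if acc.length > 1 then p.2 ++ [String.mk acc] else p.2))
      ([], [])
      = (l, ((pvSuffs l).map String.mk).reverse) := by
  induction l with
  | nil => simp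
  | cons c t ih =>
      rw [List.reverse_cons, List.foldl_append, ih]
      cases t with
      | nil => simp [pvSuffs]
      | cons b u => simp [pvSuffs]

theorem pv_A_eq (inp_str : String) : string_splitter inp_str = (pvSuffs inp_str.toList).map String.mk := by
  unfold string_splitter
  have hb : ∀ j, PySem.Str.pyGet? inp_str j = PySem.Chars.pyGet? inp_str.toList j := by
    intro j; simp [PySem.Str.pyGet?]
  simp only [hb, PySem.Str.len_eq, PySem.List.pyRange_zero_natCast, List.foldl_map]
  rw [PySem.List.foldl_congr_mem _ _
      (fun w i => if inp_str.toList.drop i ≠ [] ∧ (inp_str.toList.drop i).length > 1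
        then w ++ [String.mk (inp_str.toList.drop i)] else w) _
      (by
        intro w i hi
        have hi' : i ≤ inp_str.toList.length := le_of_lt (List.mem_range.mp hi)
        simp only [pv_inner inp_str.toList i hi' [], List.nil_append])]
  rw [pv_outer]
  simp

theorem pv_B_eq (inp_str : String) : string_splitter_alt inp_str = (pvSuffs inp_str.toList).map String.mk := by
  unfold string_splitter_alt
  rw [pv_alt_core]
  simp

-- ===== VERDICT (by name: the statement is the Claim_ definition above) =====
theorem string_splitter_spec : Claim_equal_string_splitter := by
  intro inp_str _
  unfold Spec_string_splitter
  rw [pv_A_eq, pv_B_eq]
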